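-- pv_equiv track=rewrite | github.com/ghostrider77/BioinformaticsProblems | Python/textbook_track/chapter09/ba9l.py | create_indexed_column
-- ===== SOURCE A (Python) =====
-- from collections import defaultdict
--
-- def create_indexed_column(string):
--     counts = defaultdict(int)
--     char_index = []
--     for letter in string:
--         count = counts[letter]
--         char_index.append((letter, count))
--         counts[letter] += 1
--     return char_index
-- ===== SOURCE B (Python) =====
-- def create_indexed_column(string):
--     chars = list(string)
--     return [(c, chars[:i].count(c)) for i, c in enumerate(chars)]
-- ===== Notes on version B (the rewrite author's own statement) =====
-- stated objective: simpler
-- what changed: Replaces the streaming defaultdict counter loop with a single comprehension that computes each occurrence rank as a closed-form prefix count (chars[:i].count(c)); no mutable dict or accumulator remains.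
import Mathlib
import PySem

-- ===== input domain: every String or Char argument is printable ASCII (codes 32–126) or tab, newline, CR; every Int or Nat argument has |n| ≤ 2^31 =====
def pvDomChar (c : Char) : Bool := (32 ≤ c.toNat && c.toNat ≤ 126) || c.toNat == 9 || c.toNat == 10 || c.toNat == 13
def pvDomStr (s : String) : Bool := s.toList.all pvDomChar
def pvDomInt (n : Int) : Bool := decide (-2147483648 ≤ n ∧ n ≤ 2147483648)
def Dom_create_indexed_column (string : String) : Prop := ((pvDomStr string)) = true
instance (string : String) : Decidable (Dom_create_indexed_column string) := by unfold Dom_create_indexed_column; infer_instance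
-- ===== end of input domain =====

-- B replaces A's streaming defaultdict counter with a per-position prefix-count comprehension (simpler; not faster).


-- ===== PORT A =====
-- loop body: count = counts[letter]; char_index.append((letter, count)); counts[letter] += 1
def ciStepA (st : PySem.Dict String Int × List (String × Int)) (letter : Char) :
    PySem.Dict String Int × List (String × Int) :=
  let l := String.ofList [letter]
  let count := st.1.getD l 0
  (st.1.insert l (count + 1), st.2 ++ [(l, count)])

def create_indexed_column (string : String) : List (String × Int) :=
  (string.toList.foldl ciStepA (PySem.Dict.empty, [])).2

-- ===== PORT B =====
-- [(c, chars[:i].count(c)) for i, c in enumerate(chars)]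
def create_indexed_column_alt (string : String) : List (String × Int) :=
  let chars := string.toList
  (PySem.List.enumerate chars).map (fun p =>
    (String.ofList [p.2], (PySem.List.count (PySem.List.slice chars none (some p.1)) p.2 : Int)))

-- ===== PRECONDITION & SPEC =====
def Spec_create_indexed_column (string : String) (out : List (String × Int)) : Prop := out = create_indexed_column_alt string
instance (string : String) (out : List (String × Int)) : Decidable (Spec_create_indexed_column string out) := by unfold Spec_create_indexed_column; infer_instance

-- ===== CLAIM (what is proved, stated in full; the proofs are below) =====
def Claim_equal_create_indexed_column : Prop := ∀ (string : String), Dom_create_indexed_column string → Spec_create_indexed_column string (create_indexed_column string)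

-- ===== LEMMAS AND PROOFS =====

-- the common value of both programs, phrased with an explicit already-seen prefix
def ciSpecAux (p : List Char) : List Char → List (String × Int)
  | [] => []
  | c :: rest => (String.ofList [c], (p.count c : Int)) :: ciSpecAux (p ++ [c]) rest

theorem mk_singleton_inj {c c' : Char} (h : String.ofList [c'] = String.ofList [c]) : c' = c := by
  have h2 := congrArg String.toList h
  simp only [String.toList_ofList] at h2
  exact List.head_eq_of_cons_eq h2

theorem loopA (rest : List Char) : ∀ (p : List Char) (d : PySem.Dict String Int)
    (acc : List (String × Int)),
    (∀ c : Char, d.getD (String.ofList [c]) 0 = (p.count c : Int)) →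
    (rest.foldl ciStepA (d, acc)).2 = acc ++ ciSpecAux p rest := by
  induction rest with
  | nil => intro p d acc _; simp [ciSpecAux]
  | cons c rest ih =>
    intro p d acc hd
    simp only [List.foldl_cons, ciStepA, ciSpecAux]
    rw [hd c]
    have hinv : ∀ c' : Char,
        ((d.insert (String.ofList [c]) ((p.count c : Int) + 1)).getD
          (String.ofList [c']) 0) = (((p ++ [c]).count c' : Nat) : Int) := by
      intro c'
      by_cases hcc : c' = c
      · rw [hcc, PySem.Dict.getD_insert_self]
        simp [List.count_append]
      · rw [PySem.Dict.getD_insert_of_ne _ _ _ (fun h => hcc (mk_singleton_inj h)), hd c']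
        simp [List.count_append, Ne.symm hcc]
    rw [ih (p ++ [c]) _ _ hinv]
    simp

theorem specAux_eq (rest : List Char) : ∀ (p : List Char),
    ciSpecAux p rest = (PySem.List.enumerate rest (p.length : Int)).map (fun q =>
      (String.ofList [q.2], (((p ++ rest).take q.1.toNat).count q.2 : Int))) := by
  induction rest with
  | nil => intro p; simp [ciSpecAux, PySem.List.enumerate]
  | cons c rest ih =>
    intro p
    rw [PySem.List.enumerate_cons]
    simp only [List.map_cons, ciSpecAux]
    congr 1
    · simp
    · rw [ih (p ++ [c])]
      have hlen : ((p ++ [c]).length : Int) = (p.length : Int) + 1 := by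
        simp
      rw [hlen]
      apply List.map_congr_left
      intro q _
      have : (p ++ [c]) ++ rest = p ++ c :: rest := by simp
      rw [this]

theorem A_eq_specAux (cs : List Char) :
    (cs.foldl ciStepA (PySem.Dict.empty, [])).2 = ciSpecAux [] cs := by
  rw [loopA cs [] PySem.Dict.empty []]
  · simp
  · intro c; simp [PySem.Dict.getD, PySem.Dict.get?, PySem.Dict.empty]

-- ===== VERDICT (by name: the statement is the Claim_ definition above) =====
theorem create_indexed_column_spec : Claim_equal_create_indexed_column := by
  intro s _
  unfold Spec_create_indexed_column create_indexed_column create_indexed_column_alt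
  rw [A_eq_specAux, specAux_eq]
  simp only [List.length_nil, Nat.cast_zero, List.nil_append]
  apply List.map_congr_left
  intro q hq
  rw [PySem.List.mem_enumerate_iff] at hq
  obtain ⟨k, hk, rfl⟩ := hq
  have h0 : (0 : Int) ≤ 0 + (k : Int) := by omega
  rw [PySem.List.slice_to _ h0, PySem.List.count_eq]
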